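-- pv_equiv track=rewrite | github.com/MiskaMoska/maptools | behavior_model/scripts/mapping.py | Generate_ReverseS
-- ===== SOURCE A (Python) =====
-- def Generate_ReverseS(w,h)->list:
--     rs_path = []
--     for i in range(h):
--         for j in range(w):
--             if i % 2:
--                 rs_path.append((i+1)*w-j-1)
--             else:
--                 rs_path.append(i*w+j)
--     return rs_path
-- ===== SOURCE B (Python) =====
-- def Generate_ReverseS(w, h) -> list:
--     rs_path = []
--     for i in range(h):
--         row = list(range(i * w, i * w + w))
--         rs_path += row[::-1] if i % 2 else row
--     return rs_path
-- ===== Notes on version B (the rewrite author's own statement) =====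
-- stated objective: simpler
-- what changed: B builds each row as one contiguous range(i*w, i*w+w) and reverses the whole row for odd i, extending the result row by row, instead of an inner per-element loop computing a parity-dependent index formula.
import Mathlib
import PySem

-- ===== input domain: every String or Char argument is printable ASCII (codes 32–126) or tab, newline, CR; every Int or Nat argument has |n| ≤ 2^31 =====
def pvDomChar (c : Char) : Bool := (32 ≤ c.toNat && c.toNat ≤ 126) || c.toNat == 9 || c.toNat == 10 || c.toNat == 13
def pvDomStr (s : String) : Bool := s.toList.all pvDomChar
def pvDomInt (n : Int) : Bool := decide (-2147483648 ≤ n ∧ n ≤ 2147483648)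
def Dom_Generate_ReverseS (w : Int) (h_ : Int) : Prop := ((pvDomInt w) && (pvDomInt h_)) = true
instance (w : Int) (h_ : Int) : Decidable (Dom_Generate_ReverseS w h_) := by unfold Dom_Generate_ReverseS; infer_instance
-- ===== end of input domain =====

-- B replaces the inner per-element loop with whole-row construction (one contiguous range,
-- reversed as a block for odd rows); same cost, simpler.

-- ===== PORT A =====
def Generate_ReverseS (w : Int) (h_ : Int) : List Int :=
  (PySem.List.pyRange 0 h_ 1).foldl (fun rs_path i =>
    (PySem.List.pyRange 0 w 1).foldl (fun rs_path j =>
      if PySem.Int.mod i 2 ≠ 0 then rs_path ++ [(i + 1) * w - j - 1]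
      else rs_path ++ [i * w + j]) rs_path) []

-- ===== PORT B =====
def Generate_ReverseS_alt (w : Int) (h_ : Int) : List Int :=
  (PySem.List.pyRange 0 h_ 1).foldl (fun rs_path i =>
    let row := PySem.List.pyRange (i * w) (i * w + w) 1
    rs_path ++ (if PySem.Int.mod i 2 ≠ 0 then (PySem.List.slice? row none none (-1)).getD [] else row)) []

-- ===== PRECONDITION & SPEC =====
def Spec_Generate_ReverseS (w : Int) (h_ : Int) (out : List Int) : Prop := out = Generate_ReverseS_alt w h_
instance (w : Int) (h_ : Int) (out : List Int) : Decidable (Spec_Generate_ReverseS w h_ out) := by unfold Spec_Generate_ReverseS; infer_instance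

-- ===== CLAIM (what is proved, stated in full; the proofs are below) =====
def Claim_equal_Generate_ReverseS : Prop := ∀ (w : Int) (h_ : Int), Dom_Generate_ReverseS w h_ → Spec_Generate_ReverseS w h_ (Generate_ReverseS w h_)

-- ===== LEMMAS AND PROOFS =====

theorem pv_even_row (w i : Int) :
    (PySem.List.pyRange 0 w 1).map (fun j => i * w + j) = PySem.List.pyRange (i * w) (i * w + w) 1 := by
  rw [PySem.List.pyRange_one 0 w, PySem.List.pyRange_one (i * w) (i * w + w)]
  simp only [List.map_map]
  apply List.ext_getElem
  · simp
  · intro n h1 h2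
    simp

theorem pv_odd_row (w i : Int) :
    (PySem.List.pyRange 0 w 1).map (fun j => (i + 1) * w - j - 1) = (PySem.List.pyRange (i * w) (i * w + w) 1).reverse := by
  rw [PySem.List.pyRange_one 0 w, PySem.List.pyRange_one (i * w) (i * w + w)]
  simp only [List.map_map]
  apply List.ext_getElem
  · simp
  · intro n h1 h2
    simp only [List.length_map, List.length_range, List.length_reverse] at h1 h2
    simp only [List.getElem_map, List.getElem_reverse, List.getElem_range, List.length_map,
      List.length_range, Function.comp]
    have : i * w + w - i * w = w := by ring
    rw [this] at h2 ⊢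
    have : (i + 1) * w = i * w + w := by ring
    rw [this]
    omega

theorem pv_inner (w i : Int) (rs : List Int) :
    (PySem.List.pyRange 0 w 1).foldl (fun rs_path j =>
      if PySem.Int.mod i 2 ≠ 0 then rs_path ++ [(i + 1) * w - j - 1]
      else rs_path ++ [i * w + j]) rs =
    rs ++ (if PySem.Int.mod i 2 ≠ 0 then (PySem.List.slice? (PySem.List.pyRange (i * w) (i * w + w) 1) none none (-1)).getD []
           else PySem.List.pyRange (i * w) (i * w + w) 1) := by
  by_cases h : PySem.Int.mod i 2 ≠ 0
  · rw [if_pos h, PySem.List.slice?_none_none_neg_one, Option.getD_some]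
    have hf : (fun (rs_path : List Int) (j : Int) =>
        if PySem.Int.mod i 2 ≠ 0 then rs_path ++ [(i + 1) * w - j - 1] else rs_path ++ [i * w + j]) =
        fun rs_path j => rs_path ++ [(i + 1) * w - j - 1] := by
      funext a b; rw [if_pos h]
    rw [hf, PySem.List.foldl_append_singleton_eq_map, pv_odd_row]
  · rw [if_neg h]
    have hf : (fun (rs_path : List Int) (j : Int) =>
        if PySem.Int.mod i 2 ≠ 0 then rs_path ++ [(i + 1) * w - j - 1] else rs_path ++ [i * w + j]) =
        fun rs_path j => rs_path ++ [i * w + j] := by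
      funext a b; rw [if_neg h]
    rw [hf, PySem.List.foldl_append_singleton_eq_map, pv_even_row]

-- ===== VERDICT (by name: the statement is the Claim_ definition above) =====
theorem Generate_ReverseS_spec : Claim_equal_Generate_ReverseS := by
  intro w h_ _
  show Generate_ReverseS w h_ = Generate_ReverseS_alt w h_
  unfold Generate_ReverseS Generate_ReverseS_alt
  apply PySem.List.foldl_congr_mem
  intro rs i _
  exact pv_inner w i rs
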